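-- pv_equiv track=rewrite | github.com/0417taehyun/Algorithm | LeetCode/Python/1_Easy/1385_find_the_distance_value_between_two_arrays.py | solution
-- ===== SOURCE A (Python) =====
-- def solution(arr1: list[int], arr2: list[int], d: int) -> int:
--     def binary_search(start: int, end: int, position: int) -> bool:
--         while start <= end:
--             middle: int = start + (end - start) // 2
--             target: int = arr2[middle]
--
--             if abs(target - position) <= d:
--                 return False
--             elif target > position:
--                 end = middle - 1
--             else:
--                 start = middle + 1
--
--         return True
--
--
--     arr2.sort()
--     answer, start, end = 0, 0, len(arr2) - 1
--     for position in arr1: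
--         if binary_search(start=start, end=end, position=position):
--             answer += 1
--
--     return answer
-- ===== SOURCE B (Python) =====
-- def solution(arr1: list[int], arr2: list[int], d: int) -> int:
--     # Return value equivalence only: A sorts arr2 in place, B leaves arr2 unchanged.
--     return len([x for x in arr1 if all(abs(x - y) > d for y in arr2)])
-- ===== Notes on version B (the rewrite author's own statement) =====
-- stated objective: simpler
-- what changed: Replaced A's in-place sort of arr2 plus a hand-written per-element binary search with a direct one-line comprehension counting arr1 elements whose distance to every arr2 element exceeds d; no sorting, no index arithmetic, and arr2 is left unmutated (return value is identical).
import Mathlib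
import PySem

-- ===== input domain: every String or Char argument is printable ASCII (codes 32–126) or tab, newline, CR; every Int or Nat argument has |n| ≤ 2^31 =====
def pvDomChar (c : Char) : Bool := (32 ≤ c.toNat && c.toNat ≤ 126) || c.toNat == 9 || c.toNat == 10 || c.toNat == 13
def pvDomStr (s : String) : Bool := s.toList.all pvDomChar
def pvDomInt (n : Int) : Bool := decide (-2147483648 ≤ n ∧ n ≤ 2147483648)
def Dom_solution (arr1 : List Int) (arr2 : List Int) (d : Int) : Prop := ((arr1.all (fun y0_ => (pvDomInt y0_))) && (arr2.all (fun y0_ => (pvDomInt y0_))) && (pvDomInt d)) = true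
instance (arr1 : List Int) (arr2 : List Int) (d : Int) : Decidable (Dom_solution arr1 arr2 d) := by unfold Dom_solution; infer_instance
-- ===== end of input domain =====

-- B replaces A's in-place sort + per-element binary search by a direct all-pairs distance scan
-- (simpler, same return value; A sorts arr2 in place, B does not — equivalence is about the return value only).


-- ===== PORT A =====
-- A's inner `binary_search` loop, as structural recursion on the shrinking interval.
-- `arr2[middle]`: on every reachable call 0 ≤ middle < arr2s.length, so pyGet? is `some`;
-- `.getD 0` only totalises the unreachable branch.
def bsearchA (arr2s : List Int) (d pos : Int) (start : Int) (endd : Int) : Bool :=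
  if h : start ≤ endd then
    let middle : Int := start + PySem.Int.floordiv (endd - start) 2
    let target : Int := (PySem.List.pyGet? arr2s middle).getD 0
    if |target - pos| ≤ d then false
    else if target > pos then bsearchA arr2s d pos start (middle - 1)
    else bsearchA arr2s d pos (middle + 1) endd
  else true
termination_by (endd + 1 - start).toNat
decreasing_by
  all_goals
    have h2 := PySem.Int.floordiv_eq_ediv_of_pos (a := endd - start) (b := 2) (by omega)
    simp only [h2] at *
    omega

def solution (arr1 : List Int) (arr2 : List Int) (d : Int) : Int :=
  let arr2s := PySem.List.sorted arr2 (fun x => x) false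
  let endd : Int := (arr2.length : Int) - 1
  arr1.foldl (fun answer pos => if bsearchA arr2s d pos 0 endd then answer + 1 else answer) 0

-- ===== PORT B =====
def solution_alt (arr1 : List Int) (arr2 : List Int) (d : Int) : Int :=
  ((arr1.filter (fun x => arr2.all (fun y => decide (d < |x - y|)))).length : Int)

-- ===== PRECONDITION & SPEC =====
def Spec_solution (arr1 : List Int) (arr2 : List Int) (d : Int) (out : Int) : Prop := out = solution_alt arr1 arr2 d
instance (arr1 : List Int) (arr2 : List Int) (d : Int) (out : Int) : Decidable (Spec_solution arr1 arr2 d out) := by unfold Spec_solution; infer_instance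

-- ===== CLAIM (what is proved, stated in full; the proofs are below) =====
def Claim_equal_solution : Prop := ∀ (arr1 : List Int) (arr2 : List Int) (d : Int), Dom_solution arr1 arr2 d → Spec_solution arr1 arr2 d (solution arr1 arr2 d)

-- ===== LEMMAS AND PROOFS =====

-- Binary-search correctness on a sorted list: the search over [s, e] returns true
-- iff every element with index in [s, e] is farther than d from pos.
theorem bsearchA_iff (l : List Int) (d pos : Int) (hl : l.Pairwise (· ≤ ·)) :
    ∀ (n : Nat) (s e : Int), (e + 1 - s).toNat ≤ n → 0 ≤ s → e < (l.length : Int) →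
      (bsearchA l d pos s e = true ↔
        ∀ i : Nat, (hi : i < l.length) → s ≤ (i : Int) → (i : Int) ≤ e → d < |l[i] - pos|) := by
  intro n
  induction n with
  | zero =>
    intro s e hn hs he
    rw [bsearchA]
    simp only [dif_neg (by omega : ¬ s ≤ e)]
    constructor
    · intro _ i hi h1 h2; omega
    · intro _; trivial
  | succ n ih =>
    intro s e hn hs he
    by_cases hse : s ≤ e
    · have hfd := PySem.Int.floordiv_eq_ediv_of_pos (a := e - s) (b := 2) (by omega)
      set m : Int := s + PySem.Int.floordiv (e - s) 2 with hm
      have hms : s ≤ m ∧ m ≤ e := by rw [hm, hfd]; omega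
      have hmlen : m.toNat < l.length := by omega
      have hget : PySem.List.pyGet? l m = some l[m.toNat] :=
        PySem.List.pyGet?_eq_some_getElem l (by omega) (by omega)
      have hmono : ∀ i j : Nat, (hi : i < l.length) → (hj : j < l.length) → i ≤ j →
          l[i] ≤ l[j] := by
        intro i j hi hj hij
        rcases Nat.lt_or_ge i j with hlt | hge
        · exact (List.pairwise_iff_getElem.mp hl) i j hi hj hlt
        · have : i = j := by omega
          subst this; exact le_refl _
      rw [bsearchA]
      simp only [dif_pos hse, ← hm, hget, Option.getD_some]
      by_cases hclose : |l[m.toNat] - pos| ≤ d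
      · simp only [if_pos hclose]
        constructor
        · intro hfalse; simp at hfalse
        · intro hall
          have := hall m.toNat hmlen (by omega) (by omega)
          omega
      · simp only [if_neg hclose]
        by_cases hgt : l[m.toNat] > pos
        · simp only [if_pos hgt]
          rw [ih s (m - 1) (by omega) hs (by omega)]
          constructor
          · intro hleft i hi h1 h2
            rcases Int.lt_or_le (i : Int) m with hlt | hge
            · exact hleft i hi h1 (by omega)
            · -- i ≥ m : l[i] ≥ l[m], and l[m] is far above pos
              have hge' : l[m.toNat] ≤ l[i] := hmono m.toNat i hmlen hi (by omega)
              rcases abs_cases (l[m.toNat] - pos) with ⟨ha, hb⟩ | ⟨ha, hb⟩ <;>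
                rcases abs_cases (l[i] - pos) with ⟨hc, hd2⟩ | ⟨hc, hd2⟩ <;> omega
          · intro hall i hi h1 h2; exact hall i hi h1 (by omega)
        · simp only [if_neg hgt]
          rw [ih (m + 1) e (by omega) (by omega) he]
          constructor
          · intro hright i hi h1 h2
            rcases Int.lt_or_le m (i : Int) with hlt | hge
            · exact hright i hi (by omega) h2
            · -- i ≤ m : l[i] ≤ l[m], and l[m] is far below pos
              have hle' : l[i] ≤ l[m.toNat] := hmono i m.toNat hi hmlen (by omega)
              rw [not_lt] at hgt
              rcases abs_cases (l[m.toNat] - pos) with ⟨ha, hb⟩ | ⟨ha, hb⟩ <;>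
                rcases abs_cases (l[i] - pos) with ⟨hc, hd2⟩ | ⟨hc, hd2⟩ <;> omega
          · intro hall i hi h1 h2; exact hall i hi (by omega) h2
    · rw [bsearchA]
      simp only [dif_neg hse]
      constructor
      · intro _ i hi h1 h2; omega
      · intro _; trivial

-- The full-range search over sorted arr2 decides "every element of arr2 is farther than d from pos".
theorem bsearchA_full (arr2 : List Int) (d pos : Int) :
    bsearchA (PySem.List.sorted arr2 (fun x => x) false) d pos 0 ((arr2.length : Int) - 1)
      = arr2.all (fun y => decide (d < |pos - y|)) := by
  set l := PySem.List.sorted arr2 (fun x => x) false with hl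
  have hlen : l.length = arr2.length := PySem.List.length_sorted ..
  have hsorted : l.Pairwise (· ≤ ·) := PySem.List.sorted_pairwise arr2 (fun x => x)
  have h := bsearchA_iff l d pos hsorted ((arr2.length : Int) - 1 + 1 - 0).toNat 0
      ((arr2.length : Int) - 1) (le_refl _) (le_refl _) (by omega)
  rcases Bool.eq_false_or_eq_true (arr2.all (fun y => decide (d < |pos - y|))) with hb | hb
  · rw [hb]
    rw [List.all_eq_true] at hb
    simp only [decide_eq_true_eq] at hb
    apply h.mpr
    intro i hi h1 h2
    have hmem : l[i] ∈ arr2 := (PySem.List.mem_sorted ..).mp (List.getElem_mem hi)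
    have := hb _ hmem
    rw [abs_sub_comm]; exact this
  · rw [hb]
    rw [List.all_eq_false] at hb
    obtain ⟨y, hy, hyd⟩ := hb
    simp only [decide_eq_true_eq, not_lt] at hyd
    have hy' : y ∈ l := (PySem.List.mem_sorted ..).mpr hy
    obtain ⟨i, hi, rfl⟩ := List.mem_iff_getElem.mp hy'
    by_contra hc
    have := (h.mp (by revert hc; cases bsearchA l d pos 0 ((arr2.length : Int) - 1) <;> simp))
      i hi (by omega) (by omega)
    rw [abs_sub_comm] at this
    omega

-- The counting foldl is the length of the filter.
theorem foldl_count (p : Int → Bool) :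
    ∀ (l : List Int) (a : Int),
      l.foldl (fun acc x => if p x then acc + 1 else acc) a = a + ((l.filter p).length : Int) := by
  intro l
  induction l with
  | nil => intro a; simp
  | cons x xs ih =>
    intro a
    by_cases hx : p x
    · simp [List.foldl_cons, hx, ih]; omega
    · simp [List.foldl_cons, hx, ih]

-- ===== VERDICT (by name: the statement is the Claim_ definition above) =====
theorem solution_spec : Claim_equal_solution := by
  intro arr1 arr2 d _
  unfold Spec_solution solution solution_alt
  simp only [bsearchA_full]
  rw [foldl_count]
  omega
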